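-- pv_equiv track=rewrite | github.com/imahero1492/MMArchiveCLI | src/RSLod.py | rs_lod_compare_str_with_count
-- ===== SOURCE A (Python) =====
-- def rs_lod_compare_str(s1: str, s2: str) -> int:
--     """Case-insensitive string comparison (_stricmp)"""
--     s1_lower = s1.lower()
--     s2_lower = s2.lower()
--     if s1_lower < s2_lower:
--         return -1
--     elif s1_lower > s2_lower:
--         return 1
--     return 0
--
-- def rs_lod_compare_str_with_count(s1: str, s2: str) -> tuple:
--     """Case-insensitive string comparison with same character count"""
--     same_count = 0
--     for c1, c2 in zip(s1.lower(), s2.lower()):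
--         if c1 != c2:
--             break
--         same_count += 1
--
--     result = rs_lod_compare_str(s1, s2)
--     return result, same_count
-- ===== SOURCE B (Python) =====
-- def rs_lod_compare_str_with_count(s1: str, s2: str) -> tuple:
--     """Case-insensitive string comparison with same character count (single pass)."""
--     a = s1.lower()
--     b = s2.lower()
--     same_count = 0
--     for c1, c2 in zip(a, b):
--         if c1 != c2:
--             result = -1 if c1 < c2 else 1
--             break
--         same_count += 1
--     else:
--         result = -1 if len(a) < len(b) else (1 if len(a) > len(b) else 0)
--     return result, same_count
-- ===== Notes on version B (the rewrite author's own statement) =====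
-- stated objective: alternative
-- what changed: Replaces the prefix-count loop plus a separate full lexicographic comparison of the lowered strings with one fused pass that both counts the common prefix and decides the order at the first mismatch (length tiebreak if no mismatch).
import Mathlib
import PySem

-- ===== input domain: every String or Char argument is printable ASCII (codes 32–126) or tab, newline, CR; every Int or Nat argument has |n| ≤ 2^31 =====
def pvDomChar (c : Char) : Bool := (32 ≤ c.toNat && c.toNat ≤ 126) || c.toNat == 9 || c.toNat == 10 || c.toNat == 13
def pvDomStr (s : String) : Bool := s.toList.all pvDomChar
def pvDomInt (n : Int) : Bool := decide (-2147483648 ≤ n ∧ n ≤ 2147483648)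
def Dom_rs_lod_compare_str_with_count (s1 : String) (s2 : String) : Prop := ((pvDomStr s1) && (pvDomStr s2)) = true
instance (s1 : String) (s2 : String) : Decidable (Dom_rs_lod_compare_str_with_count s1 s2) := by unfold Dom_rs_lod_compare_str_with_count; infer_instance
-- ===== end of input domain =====

-- B fuses A's prefix-count loop and its separate full lexicographic comparison into one pass (alternative decomposition, same cost).


-- ===== PORT A =====
-- Python's '<' on strings: lexicographic on code points (hand-ported; exact on all strings).
def pvStrLt : List Char → List Char → Bool
  | [], [] => false
  | [], _ :: _ => true
  | _ :: _, [] => false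
  | c :: cs, d :: ds => if c < d then true else if d < c then false else pvStrLt cs ds

-- rs_lod_compare_str: lower both, then -1 / 1 / 0 by '<' and '>'
def rs_lod_compare_str (s1 : String) (s2 : String) : Int :=
  let s1l := PySem.Chars.lower s1.toList
  let s2l := PySem.Chars.lower s2.toList
  if pvStrLt s1l s2l then -1 else if pvStrLt s2l s1l then 1 else 0

-- the for-loop over zip: count leading equal pairs, break at first mismatch
def pvCountA : List (Char × Char) → Int
  | [] => 0
  | (c1, c2) :: rest => if c1 ≠ c2 then 0 else 1 + pvCountA rest

def rs_lod_compare_str_with_count (s1 : String) (s2 : String) : Int × Int :=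
  let same_count := pvCountA ((PySem.Chars.lower s1.toList).zip (PySem.Chars.lower s2.toList))
  let result := rs_lod_compare_str s1 s2
  (result, same_count)

-- ===== PORT B =====
-- single fused pass over the two lowered strings, accumulator = same_count so far
def pvGoB : List Char → List Char → Int → Int × Int
  | [], [], n => (0, n)
  | [], _ :: _, n => (-1, n)
  | _ :: _, [], n => (1, n)
  | c :: cs, d :: ds, n =>
      if c = d then pvGoB cs ds (n + 1)
      else (if c < d then -1 else 1, n)

def rs_lod_compare_str_with_count_alt (s1 : String) (s2 : String) : Int × Int :=
  pvGoB (PySem.Chars.lower s1.toList) (PySem.Chars.lower s2.toList) 0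

-- ===== PRECONDITION & SPEC =====
def Spec_rs_lod_compare_str_with_count (s1 : String) (s2 : String) (out : Int × Int) : Prop := out = rs_lod_compare_str_with_count_alt s1 s2
instance (s1 : String) (s2 : String) (out : Int × Int) : Decidable (Spec_rs_lod_compare_str_with_count s1 s2 out) := by unfold Spec_rs_lod_compare_str_with_count; infer_instance

-- ===== CLAIM (what is proved, stated in full; the proofs are below) =====
def Claim_equal_rs_lod_compare_str_with_count : Prop := ∀ (s1 : String) (s2 : String), Dom_rs_lod_compare_str_with_count s1 s2 → Spec_rs_lod_compare_str_with_count s1 s2 (rs_lod_compare_str_with_count s1 s2)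

-- ===== LEMMAS AND PROOFS =====
theorem pvGoB_eq (a b : List Char) (n : Int) :
    pvGoB a b n =
      ((if pvStrLt a b then -1 else if pvStrLt b a then 1 else 0),
       n + pvCountA (a.zip b)) := by
  induction a generalizing b n with
  | nil =>
    cases b <;> simp [pvGoB, pvStrLt, pvCountA]
  | cons c cs ih =>
    cases b with
    | nil => simp [pvGoB, pvStrLt, pvCountA]
    | cons d ds =>
      by_cases h : c = d
      · subst h
        simp [pvGoB, pvStrLt, pvCountA, ih]
        ring
      · have hord : c < d ∨ d < c := lt_or_gt_of_ne h
        simp only [pvGoB, pvStrLt, pvCountA, if_neg h, List.zip_cons_cons]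
        rcases hord with hlt | hgt
        · simp [hlt, h]
        · simp [hgt, not_lt_of_gt hgt, h]

-- ===== VERDICT (by name: the statement is the Claim_ definition above) =====
theorem rs_lod_compare_str_with_count_spec : Claim_equal_rs_lod_compare_str_with_count := by
  intro s1 s2 _
  unfold Spec_rs_lod_compare_str_with_count rs_lod_compare_str_with_count
    rs_lod_compare_str rs_lod_compare_str_with_count_alt
  rw [pvGoB_eq]
  simp
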